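-- pv_equiv track=rewrite | github.com/SergeiBogachuk/pethelpai | engine.py | _condition_adjustments
-- ===== SOURCE A (Python) =====
-- from typing import Any
--
-- def _condition_adjustments(
--     conditions: set[str], caution_matches: list[dict[str, Any]]
-- ) -> tuple[list[str], int]:
--     reasons: list[str] = []
--     score_boost = 0
--     caution_categories = {match["category"] for match in caution_matches}
--
--     if "pancreatitis" in conditions and "fatty" in caution_categories:
--         reasons.append("A history of pancreatitis makes rich or greasy foods more risky.")
--         score_boost = max(score_boost, 1)
--
--     if "kidney disease" in conditions and "salty" in caution_categories:
--         reasons.append("Kidney disease is a reason to be stricter with salty or heavily seasoned foods.")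
--         score_boost = max(score_boost, 1)
--
--     if "diabetes" in conditions and "sweet" in caution_categories:
--         reasons.append("For diabetic pets, sugary foods are a poor fit even when they are not classic toxins.")
--         score_boost = max(score_boost, 1)
--
--     return reasons, score_boost
-- ===== SOURCE B (Python) =====
-- _CATEGORY_INDEX = {"fatty": 0, "salty": 1, "sweet": 2}
-- _CONDS = ("pancreatitis", "kidney disease", "diabetes")
-- _TEXTS = (
--     "A history of pancreatitis makes rich or greasy foods more risky.",
--     "Kidney disease is a reason to be stricter with salty or heavily seasoned foods.",
--     "For diabetic pets, sugary foods are a poor fit even when they are not classic toxins.",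
-- )
--
--
-- def _condition_adjustments(conditions, caution_matches):
--     # One pass over the matches: map each match's category straight to its rule
--     # index (no intermediate category set), keep the indices whose paired
--     # condition is present, then emit the reason texts in rule order.
--     hit = set()
--     for match in caution_matches:
--         i = _CATEGORY_INDEX.get(match["category"])
--         if i is not None and _CONDS[i] in conditions:
--             hit.add(i)
--     reasons = [_TEXTS[i] for i in sorted(hit)]
--     return reasons, min(len(reasons), 1)
-- ===== Notes on version B (the rewrite author's own statement) =====
-- stated objective: alternative
-- what changed: Instead of building a category set and testing three rule branches against it, B makes a single pass over the matches, mapping each match's category straight to a rule index via a reverse dict, keeps indices whose paired condition is present in a set, and emits the texts of the sorted indices; the boost is min(len(reasons),1).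
import Mathlib
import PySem

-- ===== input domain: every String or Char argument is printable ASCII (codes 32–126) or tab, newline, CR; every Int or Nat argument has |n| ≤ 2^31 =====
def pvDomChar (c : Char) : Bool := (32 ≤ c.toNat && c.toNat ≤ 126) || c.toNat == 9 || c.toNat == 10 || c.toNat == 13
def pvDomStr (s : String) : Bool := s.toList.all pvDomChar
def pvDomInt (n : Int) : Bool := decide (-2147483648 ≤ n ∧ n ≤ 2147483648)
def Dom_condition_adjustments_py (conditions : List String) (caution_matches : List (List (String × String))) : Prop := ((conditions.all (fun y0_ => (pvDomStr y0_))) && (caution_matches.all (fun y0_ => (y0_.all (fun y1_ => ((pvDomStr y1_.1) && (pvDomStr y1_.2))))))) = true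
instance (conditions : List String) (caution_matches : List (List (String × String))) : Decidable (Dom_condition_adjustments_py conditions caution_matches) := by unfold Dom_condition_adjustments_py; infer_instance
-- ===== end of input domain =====

-- B replaces the category-set + three rule branches with one pass over the matches that maps each
-- category to a rule index, collecting hit indices in a set and emitting texts of the sorted indices
-- (objective: alternative decomposition, same cost).

-- ===== PORT A =====
-- match["category"]: first-match lookup in the association list; under Pre_ the key is present,
-- so the getD default is never used.
def condition_adjustments_py (conditions : List String) (caution_matches : List (List (String × String))) : List String × Int :=
  let caution_categories : PySem.Set String :=
    PySem.Set.ofList (caution_matches.map (fun m => (m.lookup "category").getD ""))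
  let reasons : List String := []
  let score_boost : Int := 0
  let p := if conditions.contains "pancreatitis" && PySem.Set.contains caution_categories "fatty" then
      (reasons ++ ["A history of pancreatitis makes rich or greasy foods more risky."], max score_boost 1)
    else (reasons, score_boost)
  let q := if conditions.contains "kidney disease" && PySem.Set.contains caution_categories "salty" then
      (p.1 ++ ["Kidney disease is a reason to be stricter with salty or heavily seasoned foods."], max p.2 1)
    else p
  let r := if conditions.contains "diabetes" && PySem.Set.contains caution_categories "sweet" then
      (q.1 ++ ["For diabetic pets, sugary foods are a poor fit even when they are not classic toxins."], max q.2 1)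
    else q
  r

-- ===== PORT B =====
def pvCatIndex : PySem.Dict String Int :=
  PySem.Dict.ofList [("fatty", 0), ("salty", 1), ("sweet", 2)]
def pvConds : List String := ["pancreatitis", "kidney disease", "diabetes"]
def pvTexts : List String :=
  ["A history of pancreatitis makes rich or greasy foods more risky.",
   "Kidney disease is a reason to be stricter with salty or heavily seasoned foods.",
   "For diabetic pets, sugary foods are a poor fit even when they are not classic toxins."]

-- the body of Source B's for-loop: i = _CATEGORY_INDEX.get(match["category"]);
-- if i is not None and _CONDS[i] in conditions: hit.add(i)
def pvHitStep (conditions : List String) (h : PySem.Set Int) (m : List (String × String)) : PySem.Set Int :=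
  match PySem.Dict.get? pvCatIndex ((m.lookup "category").getD "") with
  | some i =>
      if conditions.contains (PySem.List.pyGetD pvConds i "") then PySem.Set.add h i else h
  | none => h

def condition_adjustments_py_alt (conditions : List String) (caution_matches : List (List (String × String))) : List String × Int :=
  let hit : PySem.Set Int := caution_matches.foldl (pvHitStep conditions) PySem.Set.empty
  let reasons : List String :=
    (PySem.List.sorted hit (fun x => x) false).map (fun i => PySem.List.pyGetD pvTexts i "")
  (reasons, min (PySem.List.len reasons) 1)

-- ===== PRECONDITION & SPEC =====
-- Pre_ excludes exactly the inputs where Python raises KeyError: a caution match lacking the "category" key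
-- (both A and B raise there).
def Pre_condition_adjustments_py (conditions : List String) (caution_matches : List (List (String × String))) : Prop :=
  caution_matches.all (fun m => m.any (fun p => p.1 == "category")) = true
instance (conditions : List String) (caution_matches : List (List (String × String))) : Decidable (Pre_condition_adjustments_py conditions caution_matches) := by unfold Pre_condition_adjustments_py; infer_instance

def pvWitness_condition_adjustments_py : List String × (List (List (String × String))) :=
  (["diabetes"], [[("category", "sweet")]])

def Spec_condition_adjustments_py (conditions : List String) (caution_matches : List (List (String × String))) (out : List String × Int) : Prop := out = condition_adjustments_py_alt conditions caution_matches
instance (conditions : List String) (caution_matches : List (List (String × String))) (out : List String × Int) : Decidable (Spec_condition_adjustments_py conditions caution_matches out) := by unfold Spec_condition_adjustments_py; infer_instance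

-- ===== CLAIM (what is proved, stated in full; the proofs are below) =====
def Claim_equal_condition_adjustments_py : Prop := ∀ (conditions : List String) (caution_matches : List (List (String × String))), Dom_condition_adjustments_py conditions caution_matches → Pre_condition_adjustments_py conditions caution_matches → Spec_condition_adjustments_py conditions caution_matches (condition_adjustments_py conditions caution_matches)

-- ===== LEMMAS AND PROOFS =====

-- the index-dict lookup, spelled out per category string
lemma get?_pvCatIndex (s : String) :
    PySem.Dict.get? pvCatIndex s =
      if s = "fatty" then some 0 else if s = "salty" then some 1
      else if s = "sweet" then some 2 else none := by
  split_ifs with h1 h2 h3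
  · subst h1; decide
  · subst h2; decide
  · subst h3; decide
  · simp [pvCatIndex, PySem.Dict.get?, PySem.Dict.ofList, PySem.Dict.update, PySem.Dict.insert,
      PySem.Dict.empty]
    exact ⟨fun h => h1 h.symm, fun h => h2 h.symm, fun h => h3 h.symm⟩

lemma mem_pvHitStep (conditions : List String) (h : PySem.Set Int)
    (m : List (String × String)) (j : Int) :
    j ∈ pvHitStep conditions h m ↔
      j ∈ h ∨ ∃ i, PySem.Dict.get? pvCatIndex ((m.lookup "category").getD "") = some i ∧
        conditions.contains (PySem.List.pyGetD pvConds i "") = true ∧ j = i := by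
  unfold pvHitStep
  rcases hg : PySem.Dict.get? pvCatIndex ((m.lookup "category").getD "") with _ | i
  · simp
  · dsimp only
    split_ifs with hc
    · rw [PySem.Set.mem_add]
      constructor
      · rintro (hj | rfl)
        · exact Or.inl hj
        · exact Or.inr ⟨_, rfl, hc, rfl⟩
      · rintro (hj | ⟨i', hi', _, rfl⟩)
        · exact Or.inl hj
        · cases hi'; exact Or.inr rfl
    · constructor
      · exact Or.inl
      · rintro (hj | ⟨i', hi', hc', rfl⟩)
        · exact hj
        · cases hi'; exact absurd hc' hc

lemma mem_hit_fold (conditions : List String) (ms : List (List (String × String)))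
    (h : PySem.Set Int) (j : Int) :
    j ∈ ms.foldl (pvHitStep conditions) h ↔
      j ∈ h ∨ ∃ m ∈ ms, ∃ i, PySem.Dict.get? pvCatIndex ((m.lookup "category").getD "") = some i ∧
        conditions.contains (PySem.List.pyGetD pvConds i "") = true ∧ j = i := by
  induction ms generalizing h with
  | nil => simp
  | cons m ms ih =>
      simp only [List.foldl_cons, ih, mem_pvHitStep, List.mem_cons]
      constructor
      · rintro ((hj | hj) | ⟨m', hm', hrest⟩)
        · exact Or.inl hj
        · exact Or.inr ⟨m, Or.inl rfl, hj⟩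
        · exact Or.inr ⟨m', Or.inr hm', hrest⟩
      · rintro (hj | ⟨m', rfl | hm', hrest⟩)
        · exact Or.inl (Or.inl hj)
        · exact Or.inl (Or.inr hrest)
        · exact Or.inr ⟨m', hm', hrest⟩

lemma nodup_hit_fold (conditions : List String) (ms : List (List (String × String)))
    (h : PySem.Set Int) (hn : h.Nodup) :
    (ms.foldl (pvHitStep conditions) h).Nodup := by
  induction ms generalizing h with
  | nil => exact hn
  | cons m ms ih =>
      rw [List.foldl_cons]
      apply ih
      unfold pvHitStep
      rcases PySem.Dict.get? pvCatIndex ((m.lookup "category").getD "") with _ | i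
      · exact hn
      · dsimp only
        split_ifs with hc
        · exact PySem.Set.nodup_add h i hn
        · exact hn

-- the sorted list of a nodup subset of {0,1,2}, determined by which of the three are members
lemma sorted_subset_012 (S : PySem.Set Int) (hn : S.Nodup)
    (p0 p1 p2 : Prop) [Decidable p0] [Decidable p1] [Decidable p2]
    (hc : ∀ j, j ∈ S ↔ (j = 0 ∧ p0) ∨ (j = 1 ∧ p1) ∨ (j = 2 ∧ p2)) :
    PySem.List.sorted S (fun x => x) false =
      (if p0 then [(0 : Int)] else []) ++ (if p1 then [1] else []) ++ (if p2 then [2] else []) := by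
  apply PySem.List.sorted_eq_of_perm_of_pairwise_lt
  · apply (List.perm_ext_iff_of_nodup _ hn).2
    · intro j
      rw [hc j]
      by_cases h0 : p0 <;> by_cases h1 : p1 <;> by_cases h2 : p2 <;>
        simp [h0, h1, h2]
    · by_cases h0 : p0 <;> by_cases h1 : p1 <;> by_cases h2 : p2 <;> simp [h0, h1, h2]
  · by_cases h0 : p0 <;> by_cases h1 : p1 <;> by_cases h2 : p2 <;> simp [h0, h1, h2]

-- membership in A's category set as an existence statement
lemma contains_categories (caution_matches : List (List (String × String))) (c : String) :
    PySem.Set.contains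
      (PySem.Set.ofList (caution_matches.map (fun m => (m.lookup "category").getD ""))) c =
      decide (∃ m ∈ caution_matches, (m.lookup "category").getD "" = c) := by
  by_cases h : ∃ m ∈ caution_matches, (m.lookup "category").getD "" = c
  · simp only [h, decide_true]
    rw [PySem.Set.contains_iff, PySem.Set.mem_ofList]
    obtain ⟨m, hm, he⟩ := h
    exact List.mem_map.2 ⟨m, hm, he⟩
  · simp only [h, decide_false]
    apply Bool.eq_false_iff.2
    intro hcon
    exact h (by
      obtain ⟨m, hm, he⟩ :=
        List.mem_map.1 ((PySem.Set.mem_ofList _ _).1 ((PySem.Set.contains_iff _ _).1 hcon))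
      exact ⟨m, hm, he⟩)

-- ===== VERDICT (by name: the statement is the Claim_ definition above) =====
set_option maxHeartbeats 2000000 in
theorem condition_adjustments_py_spec : Claim_equal_condition_adjustments_py := by
  intro conditions caution_matches _ _
  unfold Spec_condition_adjustments_py condition_adjustments_py condition_adjustments_py_alt
  have hsorted := sorted_subset_012
    (caution_matches.foldl (pvHitStep conditions) PySem.Set.empty)
    (nodup_hit_fold conditions caution_matches PySem.Set.empty (by simp [PySem.Set.empty]))
    ("pancreatitis" ∈ conditions ∧ ∃ m ∈ caution_matches, (m.lookup "category").getD "" = "fatty")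
    ("kidney disease" ∈ conditions ∧ ∃ m ∈ caution_matches, (m.lookup "category").getD "" = "salty")
    ("diabetes" ∈ conditions ∧ ∃ m ∈ caution_matches, (m.lookup "category").getD "" = "sweet")
    (by
      intro j
      rw [mem_hit_fold]
      constructor
      · rintro (hj | ⟨m, hm, i, hg, hcnd, rfl⟩)
        · simp [PySem.Set.empty] at hj
        · rw [get?_pvCatIndex] at hg
          split_ifs at hg with e1 e2 e3 <;> cases hg
          · exact Or.inl ⟨rfl, by simpa using hcnd, m, hm, e1⟩
          · exact Or.inr (Or.inl ⟨rfl, by simpa using hcnd, m, hm, e2⟩)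
          · exact Or.inr (Or.inr ⟨rfl, by simpa using hcnd, m, hm, e3⟩)
      · rintro (⟨rfl, hcnd, m, hm, he⟩ | ⟨rfl, hcnd, m, hm, he⟩ | ⟨rfl, hcnd, m, hm, he⟩) <;>
          exact Or.inr ⟨m, hm, _, by rw [get?_pvCatIndex, he]; rfl, by simpa using hcnd, rfl⟩)
  simp only [hsorted, contains_categories, List.map_append,
    apply_ite (List.map (fun i => PySem.List.pyGetD pvTexts i "")),
    apply_ite List.length, List.map_nil, List.map_cons, List.length_nil, List.length_cons,
    List.length_append, PySem.List.len_eq]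
  by_cases c1 : "pancreatitis" ∈ conditions <;>
  by_cases c2 : "kidney disease" ∈ conditions <;>
  by_cases c3 : "diabetes" ∈ conditions <;>
  by_cases g1 : ∃ m ∈ caution_matches, (m.lookup "category").getD "" = "fatty" <;>
  by_cases g2 : ∃ m ∈ caution_matches, (m.lookup "category").getD "" = "salty" <;>
  by_cases g3 : ∃ m ∈ caution_matches, (m.lookup "category").getD "" = "sweet" <;>
    (simp [c1, c2, c3, g1, g2, g3]; try decide)
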